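-- pv_equiv track=rewrite | github.com/himanshuat/codequotient | PreCourse/Strings/vowelSubstrings.py | countVowelSubstr
-- ===== SOURCE A (Python) =====
-- def countVowelSubstr(string):
--     vowels = 'aeiouAEIOU'
--     count = 0
--     length = len(string)
--
--     for i in range(0, length):
--         if string[i] in vowels:
--             count += length - i
--
--     return count % 10007
-- ===== SOURCE B (Python) =====
-- def countVowelSubstr(string):
--     vowels = 'aeiouAEIOU'
--     count = 0
--     vseen = 0
--     for ch in string:
--         if ch in vowels:
--             vseen += 1
--         count += vseen
--     return count % 10007
-- ===== Notes on version B (the rewrite author's own statement) =====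
-- stated objective: alternative
-- what changed: Instead of adding (length - i) at each vowel index via range/indexing, B threads a running prefix-count of vowels seen and adds it at every character, eliminating index arithmetic.
import Mathlib
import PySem

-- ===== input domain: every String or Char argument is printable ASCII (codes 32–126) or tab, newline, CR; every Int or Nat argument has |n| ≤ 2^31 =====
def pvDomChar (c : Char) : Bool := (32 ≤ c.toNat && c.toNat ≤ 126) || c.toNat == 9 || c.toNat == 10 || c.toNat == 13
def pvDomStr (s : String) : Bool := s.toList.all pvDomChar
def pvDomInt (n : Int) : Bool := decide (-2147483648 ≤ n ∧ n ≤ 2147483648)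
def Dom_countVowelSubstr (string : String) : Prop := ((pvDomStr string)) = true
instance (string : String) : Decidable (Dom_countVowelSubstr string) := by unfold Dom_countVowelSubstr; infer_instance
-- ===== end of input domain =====

-- B replaces A's indexed loop adding (length - i) per vowel by a single pass that adds a
-- running prefix-count of vowels at every character (alternative decomposition, same cost).

-- ===== PORT A =====
-- loop 'for i in range(0, length): if string[i] in vowels: count += length - i'
def countVowelSubstr (string : String) : Int :=
  let vowels := "aeiouAEIOU"
  let length : Int := PySem.Str.len string
  let count : Int :=
    (PySem.List.pyRange 0 length 1).foldl
      (fun count i =>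
        if ((PySem.Str.pyGet? string i).map (fun c => vowels.toList.contains c)).getD false
        then count + (length - i) else count) 0
  PySem.Int.mod count 10007

-- ===== PORT B =====
-- one pass: vseen = vowels seen so far, count += vseen at every character
def countVowelSubstr_alt (string : String) : Int :=
  let vowels := "aeiouAEIOU"
  let p : Int × Int :=
    string.toList.foldl
      (fun (p : Int × Int) ch =>
        let vseen := if vowels.toList.contains ch then p.2 + 1 else p.2
        (p.1 + vseen, vseen)) (0, 0)
  PySem.Int.mod p.1 10007

-- ===== PRECONDITION & SPEC =====
def Spec_countVowelSubstr (string : String) (out : Int) : Prop := out = countVowelSubstr_alt string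
instance (string : String) (out : Int) : Decidable (Spec_countVowelSubstr string out) := by unfold Spec_countVowelSubstr; infer_instance

-- ===== CLAIM (what is proved, stated in full; the proofs are below) =====
def Claim_equal_countVowelSubstr : Prop := ∀ (string : String), Dom_countVowelSubstr string → Spec_countVowelSubstr string (countVowelSubstr string)

-- ===== LEMMAS AND PROOFS =====

-- reference quantity: sum over xs of (suffix length including c) at each vowel
def pvW (cs : List Char) : Int :=
  match cs with
  | [] => 0
  | c :: r => (if "aeiouAEIOU".toList.contains c then ((r.length : Int) + 1) else 0) + pvW r

lemma pvA_sum (cs : List Char) :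
    ((List.range cs.length).map
      (fun (k : Nat) => if ((cs[k]?).map (fun c => "aeiouAEIOU".toList.contains c)).getD false
                then ((cs.length : Int) - (k : Int)) else 0)).sum = pvW cs := by
  induction cs with
  | nil => simp [pvW]
  | cons c r ih =>
    simp only [List.length_cons]
    rw [List.range_succ_eq_map]
    simp only [List.map_cons, List.map_map, List.sum_cons]
    have hrest : ((List.range r.length).map
        ((fun (k : Nat) => if (((c :: r)[k]?).map (fun c => "aeiouAEIOU".toList.contains c)).getD false
                   then (((r.length + 1 : Nat) : Int) - (k : Int)) else 0) ∘ Nat.succ)).sum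
        = ((List.range r.length).map
        (fun (k : Nat) => if ((r[k]?).map (fun c => "aeiouAEIOU".toList.contains c)).getD false
                   then ((r.length : Int) - (k : Int)) else 0)).sum := by
      apply congrArg
      apply List.map_congr_left
      intro k _
      simp only [Function.comp, List.getElem?_cons_succ]
      push_cast
      ring_nf
    rw [hrest, ih, pvW]
    simp only [List.getElem?_cons_zero, Option.map_some, Option.getD_some]
    by_cases h : "aeiouAEIOU".toList.contains c
    · rw [if_pos h, if_pos h]; push_cast; ring
    · rw [if_neg h, if_neg h]

lemma pvB_fold (cs : List Char) (cnt v : Int) :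
    (cs.foldl
      (fun (p : Int × Int) ch =>
        let vseen := if "aeiouAEIOU".toList.contains ch then p.2 + 1 else p.2
        (p.1 + vseen, vseen)) (cnt, v)).1 = cnt + v * (cs.length : Int) + pvW cs := by
  induction cs generalizing cnt v with
  | nil => simp [pvW]
  | cons c r ih =>
    simp only [List.foldl_cons, pvW, List.length_cons]
    by_cases h : "aeiouAEIOU".toList.contains c
    · rw [if_pos h, if_pos h, ih]; push_cast; ring
    · rw [if_neg h, if_neg h, ih]; push_cast; ring

-- ===== VERDICT (by name: the statement is the Claim_ definition above) =====
theorem countVowelSubstr_spec : Claim_equal_countVowelSubstr := by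
  intro s _
  unfold Spec_countVowelSubstr countVowelSubstr countVowelSubstr_alt
  apply congrArg (fun z => PySem.Int.mod z 10007)
  rw [pvB_fold s.toList 0 0]
  rw [PySem.Str.len_eq, PySem.List.pyRange_one]
  rw [List.foldl_map]
  have hbody : (fun (count : Int) (k : Nat) =>
      if ((PySem.Str.pyGet? s ((0 : Int) + (k : Int))).map
            (fun c => "aeiouAEIOU".toList.contains c)).getD false
      then count + ((s.toList.length : Int) - ((0 : Int) + (k : Int))) else count)
      = (fun (count : Int) (k : Nat) => count +
        (if ((s.toList[k]?).map (fun c => "aeiouAEIOU".toList.contains c)).getD false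
         then ((s.toList.length : Int) - (k : Int)) else 0)) := by
    funext count k
    have hg : PySem.Str.pyGet? s ((0 : Int) + (k : Int)) = s.toList[k]? := by
      simp [PySem.Str.pyGet?, PySem.List.pyGet?_natCast]
    rw [hg]
    split <;> simp
  rw [hbody, PySem.List.foldl_add]
  have hn : (((s.toList.length : Int)) - 0).toNat = s.toList.length := by omega
  rw [hn, pvA_sum]
  ring
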